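-- pv_equiv track=rewrite | github.com/DanielHabib/tothetop | ElevatorRide.py | list_format
-- ===== SOURCE A (Python) =====
-- def list_format(answer_list_dupe):
--     """Formats list for results
--
--     args:
--         answer_list_dupes(list): a list of floors with possible duplicates
--
--     return:
--         a formatted list with no duplicates
--     """
--     results = []
--     distance = 0
--     answer_list = [answer_list_dupe[0]]
--
--     for i in range(1, len(answer_list_dupe)):
--         if answer_list_dupe[i] != answer_list_dupe[i-1]:
--             answer_list.append(answer_list_dupe[i])
--
--     for item in answer_list:
--         results.append(str(item))
--
--     for i in range(len(answer_list)-1):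
--         if answer_list[i] > answer_list[i+1]:
--             distance += (answer_list[i] - answer_list[i+1])
--         else:
--             distance += (answer_list[i+1] - answer_list[i])
--
--     distance_str = ''.join(['(', str(distance), ')'])
--     results.append(distance_str)
--
--     return ' '.join(results)
-- ===== SOURCE B (Python) =====
-- def list_format(answer_list_dupe):
--     prev = answer_list_dupe[0]
--     results = [str(prev)]
--     distance = 0
--     for c in answer_list_dupe[1:]:
--         if c != prev:
--             results.append(str(c))
--             distance += abs(c - prev)
--             prev = c
--     results.append('(' + str(distance) + ')')
--     return ' '.join(results)
-- ===== Notes on version B (the rewrite author's own statement) =====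
-- stated objective: simpler
-- what changed: B fuses A's three separate passes (adjacent-dedup list build, stringify pass, adjacent-distance pass) into one linear loop carrying (prev kept element, result strings, running distance), using abs() instead of a comparison branch.
import Mathlib
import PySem

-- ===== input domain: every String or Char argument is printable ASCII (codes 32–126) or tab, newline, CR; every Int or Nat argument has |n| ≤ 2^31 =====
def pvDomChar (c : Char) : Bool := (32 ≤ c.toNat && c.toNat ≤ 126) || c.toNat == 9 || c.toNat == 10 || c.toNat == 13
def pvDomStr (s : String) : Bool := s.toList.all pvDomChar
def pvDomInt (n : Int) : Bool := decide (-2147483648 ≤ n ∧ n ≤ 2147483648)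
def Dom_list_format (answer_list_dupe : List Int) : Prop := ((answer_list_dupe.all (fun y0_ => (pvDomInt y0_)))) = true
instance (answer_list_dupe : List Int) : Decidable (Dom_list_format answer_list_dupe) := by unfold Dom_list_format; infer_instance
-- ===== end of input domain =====

-- B fuses A's three passes into one loop; same return value on every non-empty list.

-- ===== PORT A =====
-- first loop of A: keep answer_list_dupe[i] when it differs from answer_list_dupe[i-1]
-- (structural recursion over the tail, carrying the previous element)
def aDedup (prev : Int) : List Int → List Int
  | [] => []
  | y :: ys => if y ≠ prev then y :: aDedup y ys else aDedup prev ys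

-- third loop of A: sum of adjacent gaps, with A's explicit comparison branch
def aDist : List Int → Int
  | x :: y :: rest => (if x > y then x - y else y - x) + aDist (y :: rest)
  | _ => 0

def list_format (answer_list_dupe : List Int) : String :=
  match answer_list_dupe with
  | [] => ""   -- Python raises IndexError here; excluded by Pre_list_format
  | x :: rest =>
    let answer_list := x :: aDedup x rest
    let results := answer_list.map PySem.Int.toStr
    let distance := aDist answer_list
    let distance_str := PySem.Str.join "" ["(", PySem.Int.toStr distance, ")"]
    PySem.Str.join " " (results ++ [distance_str])

-- ===== PORT B =====
def bStep (st : Int × List String × Int) (c : Int) : Int × List String × Int :=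
  let (prev, results, distance) := st
  if c ≠ prev then (c, results ++ [PySem.Int.toStr c], distance + |c - prev|)
  else st

def list_format_alt (answer_list_dupe : List Int) : String :=
  match answer_list_dupe with
  | [] => ""   -- IndexError in Python; excluded by Pre_list_format
  | x :: rest =>
    let (_, results, distance) := rest.foldl bStep (x, [PySem.Int.toStr x], 0)
    PySem.Str.join " " (results ++ [PySem.Str.join "" ["(", PySem.Int.toStr distance, ")"]])

-- ===== PRECONDITION & SPEC =====
-- Pre_ excludes only the empty list, on which both Pythons raise IndexError.
def Pre_list_format (answer_list_dupe : List Int) : Prop := answer_list_dupe ≠ []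
instance (answer_list_dupe : List Int) : Decidable (Pre_list_format answer_list_dupe) := by unfold Pre_list_format; infer_instance
def pvWitness_list_format : List Int := ([3, 3, 1, 5, 5, 2])

def Spec_list_format (answer_list_dupe : List Int) (out : String) : Prop := out = list_format_alt answer_list_dupe
instance (answer_list_dupe : List Int) (out : String) : Decidable (Spec_list_format answer_list_dupe out) := by unfold Spec_list_format; infer_instance

-- ===== CLAIM (what is proved, stated in full; the proofs are below) =====
def Claim_equal_list_format : Prop := ∀ (answer_list_dupe : List Int), Dom_list_format answer_list_dupe → Pre_list_format answer_list_dupe → Spec_list_format answer_list_dupe (list_format answer_list_dupe)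

-- ===== LEMMAS AND PROOFS =====

-- the fold of B computes A's dedup strings and A's adjacent-gap sum
theorem bStep_loop (rest : List Int) (prev : Int) (res : List String) (d : Int) :
    ∃ p, rest.foldl bStep (prev, res, d) =
      (p, res ++ (aDedup prev rest).map PySem.Int.toStr, d + aDist (prev :: aDedup prev rest)) := by
  induction rest generalizing prev res d with
  | nil => exact ⟨prev, by simp [aDedup, aDist]⟩
  | cons c cs ih =>
    by_cases h : c = prev
    · subst h
      obtain ⟨p, hp⟩ := ih c res d
      exact ⟨p, by simpa [aDedup, bStep] using hp⟩
    · obtain ⟨p, hp⟩ := ih c (res ++ [PySem.Int.toStr c]) (d + |c - prev|)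
      refine ⟨p, ?_⟩
      have habs : |c - prev| = if prev > c then prev - c else c - prev := by
        rcases le_or_gt c prev with h1 | h1
        · rw [abs_of_nonpos (by omega)]; split_ifs with h2 <;> omega
        · rw [abs_of_nonneg (by omega)]; split_ifs with h2 <;> omega
      simp only [List.foldl_cons, bStep, if_pos h, hp, aDedup, List.map_cons, aDist,
        Prod.mk.injEq]
      refine ⟨trivial, by simp, ?_⟩
      rw [habs]; ring

theorem list_format_spec : Claim_equal_list_format := by
  intro xs _ hpre
  unfold Spec_list_format
  match xs with
  | [] => exact absurd rfl hpre
  | x :: rest =>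
    obtain ⟨p, hp⟩ := bStep_loop rest x [PySem.Int.toStr x] 0
    simp only [list_format, list_format_alt, hp, List.map_cons, List.singleton_append,
      zero_add]
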